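-- pv_equiv track=rewrite | github.com/braujian565/envctl | envctl/flattener.py | unflatten_set
-- ===== SOURCE A (Python) =====
-- from typing import Optional
--
-- def unflatten_set(
--     flat: dict[str, str],
--     separator: str = "_",
--     known_prefixes: Optional[list[str]] = None,
-- ) -> dict[str, dict[str, str]]:
--     """Split a flat env dict back into named sub-sets by prefix.
--
--     Args:
--         flat: Flat env dict (e.g. produced by flatten_sets).
--         separator: Separator that was used between set name and key.
--         known_prefixes: If provided, only these prefixes are extracted;
--                         remaining keys land in a '__root__' set.
--
--     Returns:
--         Dict mapping set-name -> {key: value}.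
--     """
--     groups: dict[str, dict[str, str]] = {}
--     for raw_key, value in flat.items():
--         matched = False
--         if known_prefixes:
--             for prefix in known_prefixes:
--                 token = prefix.upper() + separator
--                 if raw_key.startswith(token):
--                     inner_key = raw_key[len(token):]
--                     groups.setdefault(prefix.lower(), {})[inner_key] = value
--                     matched = True
--                     break
--         if not matched:
--             groups.setdefault("__root__", {})[raw_key] = value
--     return groups
-- ===== SOURCE B (Python) =====
-- from typing import Optional
--
-- def unflatten_set(
--     flat: dict[str, str],
--     separator: str = "_",
--     known_prefixes: Optional[list[str]] = None,
-- ) -> dict[str, dict[str, str]]: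
--     """Label each key once, then group: classify -> first-occurrence order -> collect."""
--     prefixes = known_prefixes or []
--
--     def classify(key: str) -> tuple[str, str]:
--         for prefix in prefixes:
--             token = prefix.upper() + separator
--             if key.startswith(token):
--                 return prefix.lower(), key[len(token):]
--         return "__root__", key
--
--     labeled = [(classify(k), v) for k, v in flat.items()]
--     order = list(dict.fromkeys(g for (g, _), _ in labeled))
--     return {g: {ik: v for (g2, ik), v in labeled if g2 == g} for g in order}
-- ===== Notes on version B (the rewrite author's own statement) =====
-- stated objective: alternative
-- what changed: A builds the nested dict in one pass with setdefault-mutation and an inner break loop; B decomposes into classify each key once, dedup the labels for the group order, then collect each group's items by a filtered comprehension.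
import Mathlib
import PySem

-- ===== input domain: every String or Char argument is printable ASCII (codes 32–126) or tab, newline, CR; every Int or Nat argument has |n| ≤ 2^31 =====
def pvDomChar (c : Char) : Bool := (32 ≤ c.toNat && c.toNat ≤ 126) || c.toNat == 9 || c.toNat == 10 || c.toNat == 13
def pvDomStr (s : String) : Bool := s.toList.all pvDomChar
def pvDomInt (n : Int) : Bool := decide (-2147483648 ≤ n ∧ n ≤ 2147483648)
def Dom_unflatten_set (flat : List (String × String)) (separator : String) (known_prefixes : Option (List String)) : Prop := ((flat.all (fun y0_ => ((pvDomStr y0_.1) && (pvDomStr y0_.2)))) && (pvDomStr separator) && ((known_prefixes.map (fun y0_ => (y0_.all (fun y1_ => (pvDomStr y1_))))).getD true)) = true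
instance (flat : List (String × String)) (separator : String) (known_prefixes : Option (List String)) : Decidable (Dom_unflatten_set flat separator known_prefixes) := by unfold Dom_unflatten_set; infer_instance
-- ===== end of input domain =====

-- B replaces A's single mutation loop (nested prefix scan + setdefault into a dict of dicts)
-- by a classify-then-group decomposition: label every key once, dedup the labels for the
-- group order, then collect each group; objective: alternative (same cost, different shape).

-- ===== PORT A =====
-- the inner 'for prefix in known_prefixes: … break' loop: first prefix whose token the key
-- starts with, returning (prefix.lower(), raw_key[len(token):])
def pvMatchA (raw_key separator : String) : List String → Option (String × String)
  | [] => none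
  | p :: ps =>
    let token := PySem.Chars.upper p.toList ++ separator.toList
    if PySem.Chars.startswith raw_key.toList token then
      some (String.ofList (PySem.Chars.lower p.toList),
            String.ofList (PySem.List.slice raw_key.toList (some (token.length : Int)) none))
    else pvMatchA raw_key separator ps

def unflatten_set (flat : List (String × String)) (separator : String) (known_prefixes : Option (List String)) : List (String × List (String × String)) :=
  let groups :=
    flat.foldl (fun (groups : PySem.Dict String (PySem.Dict String String)) kv =>
      -- 'if known_prefixes:' — truthy iff some non-empty list
      let m := match known_prefixes with
               | some (p :: ps) => pvMatchA kv.1 separator (p :: ps)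
               | _ => none
      match m with
      | some gik => groups.modify gik.1 PySem.Dict.empty (fun inner => inner.insert gik.2 kv.2)
      | none => groups.modify "__root__" PySem.Dict.empty (fun inner => inner.insert kv.1 kv.2))
      PySem.Dict.empty
  groups.items.map (fun p => (p.1, p.2.items))

-- ===== PORT B =====
-- classify(key): group name and inner key for the first matching prefix, else __root__
def pvClassifyB (key separator : String) : List String → String × String
  | [] => ("__root__", key)
  | p :: ps =>
    let token := PySem.Chars.upper p.toList ++ separator.toList
    if PySem.Chars.startswith key.toList token then
      (String.ofList (PySem.Chars.lower p.toList),
       String.ofList (PySem.List.slice key.toList (some (token.length : Int)) none))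
    else pvClassifyB key separator ps

def unflatten_set_alt (flat : List (String × String)) (separator : String) (known_prefixes : Option (List String)) : List (String × List (String × String)) :=
  let prefixes := known_prefixes.getD []        -- 'known_prefixes or []'
  let labeled := flat.map (fun kv => (pvClassifyB kv.1 separator prefixes, kv.2))
  let order := PySem.List.dedup (labeled.map (fun e => e.1.1))       -- dict.fromkeys
  (PySem.Dict.ofList (order.map (fun g =>
    (g, (PySem.Dict.ofList ((labeled.filter (fun e => e.1.1 == g)).map
           (fun e => (e.1.2, e.2)))).items)))).items

-- ===== PRECONDITION & SPEC =====
def Spec_unflatten_set (flat : List (String × String)) (separator : String) (known_prefixes : Option (List String)) (out : List (String × List (String × String))) : Prop := out = unflatten_set_alt flat separator known_prefixes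
instance (flat : List (String × String)) (separator : String) (known_prefixes : Option (List String)) (out : List (String × List (String × String))) : Decidable (Spec_unflatten_set flat separator known_prefixes out) := by unfold Spec_unflatten_set; infer_instance

-- ===== CLAIM (what is proved, stated in full; the proofs are below) =====
def Claim_equal_unflatten_set : Prop := ∀ (flat : List (String × String)) (separator : String) (known_prefixes : Option (List String)), Dom_unflatten_set flat separator known_prefixes → Spec_unflatten_set flat separator known_prefixes (unflatten_set flat separator known_prefixes)

-- ===== LEMMAS AND PROOFS =====

-- Dict.ofList builds by repeated insert (items agree definitionally)
lemma pvOfList_foldl {κ ν : Type} [BEq κ] (l : List (κ × ν)) :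
    PySem.Dict.ofList l = l.foldl (fun d p => d.insert p.1 p.2) PySem.Dict.empty :=
  PySem.Dict.ext_iff.mpr rfl

-- A's first-match-or-root equals B's classify, on any prefix list
lemma match_eq_classify (key separator : String) (l : List String) :
    (match pvMatchA key separator l with
     | some gik => gik
     | none => ("__root__", key)) = pvClassifyB key separator l := by
  induction l with
  | nil => simp [pvMatchA, pvClassifyB]
  | cons p ps ih =>
    simp only [pvMatchA, pvClassifyB]
    split_ifs <;> simp [ih]

-- A's grouping loop, one group's contents: the g-labelled items, inserted in order
lemma getD_groupLoop (L : List ((String × String) × String))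
    (d : PySem.Dict String (PySem.Dict String String)) (g : String) :
    (L.foldl (fun d e => d.modify e.1.1 PySem.Dict.empty (fun inner => inner.insert e.1.2 e.2)) d).getD g PySem.Dict.empty
      = (L.filter (fun e => e.1.1 == g)).foldl (fun inner e => inner.insert e.1.2 e.2) (d.getD g PySem.Dict.empty) := by
  induction L generalizing d with
  | nil => rfl
  | cons e L ih =>
    simp only [List.foldl_cons, List.filter_cons, ih]
    by_cases h : e.1.1 = g
    · simp [h]
    · simp [h, PySem.Dict.getD_modify, Ne.symm h]

-- A's loop over the labelled items equals B's grouped construction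
lemma groupLoop_eq_grouped (L : List ((String × String) × String)) :
    ((L.foldl (fun d e => d.modify e.1.1 PySem.Dict.empty (fun inner => inner.insert e.1.2 e.2)) PySem.Dict.empty).items).map (fun p => (p.1, p.2.items))
      = (PySem.Dict.ofList ((PySem.List.dedup (L.map (fun e => e.1.1))).map (fun g =>
          (g, (PySem.Dict.ofList ((L.filter (fun e => e.1.1 == g)).map (fun e => (e.1.2, e.2)))).items)))).items := by
  have hnd : (L.foldl (fun d e => d.modify e.1.1 PySem.Dict.empty (fun inner => inner.insert e.1.2 e.2)) PySem.Dict.empty).keys.Nodup := by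
    exact PySem.Dict.nodup_keys_foldl_modify_key L (fun e => e.1.1) PySem.Dict.empty
      (fun d e inner => inner.insert e.1.2 e.2) PySem.Dict.empty PySem.Dict.nodup_keys_empty
  have hkeys : (L.foldl (fun d e => d.modify e.1.1 PySem.Dict.empty (fun inner => inner.insert e.1.2 e.2)) PySem.Dict.empty).keys
      = PySem.List.dedup (L.map (fun e => e.1.1)) := by
    rw [PySem.Dict.keys_foldl_modify_key L (fun e => e.1.1) PySem.Dict.empty
      (fun d e inner => inner.insert e.1.2 e.2) PySem.Dict.empty,
      PySem.List.dedup_eq_ofList]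
    simp [PySem.Dict.keys_empty, PySem.Set.update_nil_left, PySem.Set.ofList]
  -- left side: items as keys.map, then getD by the group-contents lemma
  rw [PySem.Dict.items_eq_map_keys _ hnd PySem.Dict.empty, hkeys]
  -- right side: ofList over distinct keys is the list itself
  have hndk : ((PySem.List.dedup (L.map (fun e => e.1.1))).map (fun g =>
      (g, (PySem.Dict.ofList ((L.filter (fun e => e.1.1 == g)).map (fun e => (e.1.2, e.2)))).items))).map Prod.fst
      = PySem.List.dedup (L.map (fun e => e.1.1)) := by simp [Function.comp_def]
  have hfresh : ∀ a ∈ ((PySem.List.dedup (L.map (fun e => e.1.1))).map (fun g =>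
      (g, (PySem.Dict.ofList ((L.filter (fun e => e.1.1 == g)).map (fun e => (e.1.2, e.2)))).items))),
      (PySem.Dict.empty : PySem.Dict String (List (String × String))).contains a.1 = false := by
    intro a _; simp [PySem.Dict.contains_empty]
  have hofl : (PySem.Dict.ofList ((PySem.List.dedup (L.map (fun e => e.1.1))).map (fun g =>
      (g, (PySem.Dict.ofList ((L.filter (fun e => e.1.1 == g)).map (fun e => (e.1.2, e.2)))).items)))).items
      = (PySem.List.dedup (L.map (fun e => e.1.1))).map (fun g =>
          (g, (PySem.Dict.ofList ((L.filter (fun e => e.1.1 == g)).map (fun e => (e.1.2, e.2)))).items)) := by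
    have := PySem.Dict.items_foldl_insert_fresh
      ((PySem.List.dedup (L.map (fun e => e.1.1))).map (fun g =>
        (g, (PySem.Dict.ofList ((L.filter (fun e => e.1.1 == g)).map (fun e => (e.1.2, e.2)))).items)))
      Prod.fst Prod.snd PySem.Dict.empty hfresh
      (by rw [hndk]; exact PySem.List.nodup_dedup _)
    simpa [pvOfList_foldl] using this
  rw [hofl, List.map_map]
  refine List.map_congr_left ?_
  intro g _
  simp only [Function.comp]
  congr 1
  rw [getD_groupLoop, PySem.Dict.getD_empty]
  simp [pvOfList_foldl, List.foldl_map]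

-- ===== VERDICT (by name: the statement is the Claim_ definition above) =====
theorem unflatten_set_spec : Claim_equal_unflatten_set := by
  intro flat separator known_prefixes _
  unfold Spec_unflatten_set unflatten_set unflatten_set_alt
  -- A's step on kv equals the grouping step on the classified item
  have hstep : ∀ (d : PySem.Dict String (PySem.Dict String String)) (kv : String × String),
      (let m := match known_prefixes with
                | some (p :: ps) => pvMatchA kv.1 separator (p :: ps)
                | _ => none
       match m with
       | some gik => d.modify gik.1 PySem.Dict.empty (fun inner => inner.insert gik.2 kv.2)
       | none => d.modify "__root__" PySem.Dict.empty (fun inner => inner.insert kv.1 kv.2))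
      = (fun d (e : (String × String) × String) =>
          d.modify e.1.1 PySem.Dict.empty (fun inner => inner.insert e.1.2 e.2)) d
          ((pvClassifyB kv.1 separator (known_prefixes.getD []), kv.2)) := by
    intro d kv
    match known_prefixes with
    | none => simp [pvClassifyB]
    | some [] => simp [pvClassifyB]
    | some (p :: ps) =>
      simp only [Option.getD_some]
      rw [← match_eq_classify kv.1 separator (p :: ps)]
      cases pvMatchA kv.1 separator (p :: ps) <;> simp
  have hfold : flat.foldl (fun (groups : PySem.Dict String (PySem.Dict String String)) kv =>
      match (match known_prefixes with
             | some (p :: ps) => pvMatchA kv.1 separator (p :: ps)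
             | _ => none) with
      | some gik => groups.modify gik.1 PySem.Dict.empty (fun inner => inner.insert gik.2 kv.2)
      | none => groups.modify "__root__" PySem.Dict.empty (fun inner => inner.insert kv.1 kv.2))
      PySem.Dict.empty
      = (flat.map (fun kv => (pvClassifyB kv.1 separator (known_prefixes.getD []), kv.2))).foldl
          (fun d e => d.modify e.1.1 PySem.Dict.empty (fun inner => inner.insert e.1.2 e.2))
          PySem.Dict.empty := by
    rw [List.foldl_map]
    exact PySem.List.foldl_congr_mem flat _ _ _ (fun d kv _ => hstep d kv)
  simp only []
  rw [hfold, groupLoop_eq_grouped]
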